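-- pv_equiv track=rewrite | github.com/iwbc-mzk/atcoder-readme-stats | src/utils.py | get_rating_color
-- ===== SOURCE A (Python) =====
-- def get_rating_color(rating: int) -> str:
--     color = "#000000"
--     colors = {
--         400: "#808080",
--         800: "#ba5f17",
--         1200: "#008000",
--         1600: "#00C0C0",
--         2000: "#4169e1",
--         2400: "#C0C000",
--         2800: "#FF8000",
--         10000: "#FF0000",
--     }
--     for r, c in colors.items():
--         if rating < r:
--             color = c
--             break
--
--     return color
-- ===== SOURCE B (Python) =====
-- import bisect
--
-- _THRESHOLDS = [400, 800, 1200, 1600, 2000, 2400, 2800, 10000]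
-- _COLORS = ["#808080", "#ba5f17", "#008000", "#00C0C0",
--            "#4169e1", "#C0C000", "#FF8000", "#FF0000"]
--
-- def get_rating_color(rating: int) -> str:
--     idx = bisect.bisect_right(_THRESHOLDS, rating)
--     if idx < len(_THRESHOLDS):
--         return _COLORS[idx]
--     return "#000000"
-- ===== Notes on version B (the rewrite author's own statement) =====
-- stated objective: idiomatic
-- what changed: Replaced the linear scan with break over a dict by a binary search (bisect_right) on a sorted threshold list indexing a parallel color list.
import Mathlib
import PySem

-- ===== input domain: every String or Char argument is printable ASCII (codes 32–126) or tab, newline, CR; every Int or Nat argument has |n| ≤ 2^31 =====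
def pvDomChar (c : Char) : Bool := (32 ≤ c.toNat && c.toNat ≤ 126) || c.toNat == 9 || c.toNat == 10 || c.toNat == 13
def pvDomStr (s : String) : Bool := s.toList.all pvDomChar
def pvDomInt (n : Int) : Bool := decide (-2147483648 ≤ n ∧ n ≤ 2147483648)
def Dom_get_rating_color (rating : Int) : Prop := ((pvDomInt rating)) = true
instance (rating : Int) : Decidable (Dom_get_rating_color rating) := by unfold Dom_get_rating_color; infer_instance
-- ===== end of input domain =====

-- B replaces A's linear scan-with-break over a dict by a binary search (bisect_right) on a
-- sorted threshold list with a parallel color list (idiomatic; no speed claim).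

-- ===== PORT A =====
-- linear scan over the dict's items, stopping at the first threshold exceeding rating
def grcScan (rating : Int) : List (Int × String) → String
  | [] => "#000000"
  | (r, c) :: rest => if rating < r then c else grcScan rating rest

def get_rating_color (rating : Int) : String :=
  grcScan rating
    [(400, "#808080"), (800, "#ba5f17"), (1200, "#008000"), (1600, "#00C0C0"),
     (2000, "#4169e1"), (2400, "#C0C000"), (2800, "#FF8000"), (10000, "#FF0000")]

-- ===== PORT B =====
def grcThresholds : List Int := [400, 800, 1200, 1600, 2000, 2400, 2800, 10000]
def grcColors : List String :=
  ["#808080", "#ba5f17", "#008000", "#00C0C0", "#4169e1", "#C0C000", "#FF8000", "#FF0000"]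

-- bisect.bisect_right as a binary search on [lo, hi)
def grcBisectRight (xs : List Int) (x : Int) (lo hi : Nat) : Nat :=
  if lo < hi then
    let mid := (lo + hi) / 2
    if x < xs.getD mid 0 then grcBisectRight xs x lo mid
    else grcBisectRight xs x (mid + 1) hi
  else lo
termination_by hi - lo
decreasing_by all_goals omega

def get_rating_color_alt (rating : Int) : String :=
  let idx := grcBisectRight grcThresholds rating 0 grcThresholds.length
  if idx < grcThresholds.length then grcColors.getD idx "" else "#000000"

-- ===== PRECONDITION & SPEC =====
def Spec_get_rating_color (rating : Int) (out : String) : Prop := out = get_rating_color_alt rating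
instance (rating : Int) (out : String) : Decidable (Spec_get_rating_color rating out) := by unfold Spec_get_rating_color; infer_instance

-- ===== CLAIM (what is proved, stated in full; the proofs are below) =====
def Claim_equal_get_rating_color : Prop := ∀ (rating : Int), Dom_get_rating_color rating → Spec_get_rating_color rating (get_rating_color rating)

-- ===== LEMMAS AND PROOFS =====

-- ===== VERDICT (by name: the statement is the Claim_ definition above) =====
theorem get_rating_color_spec : Claim_equal_get_rating_color := by
  intro rating _
  unfold Spec_get_rating_color get_rating_color get_rating_color_alt
  by_cases h0 : rating < 400
  ·
    simp [grcScan, grcBisectRight, grcThresholds, grcColors, show rating < 400 from by omega, show rating < 800 from by omega, show rating < 1200 from by omega, show rating < 1600 from by omega, show rating < 2000 from by omega, show rating < 2400 from by omega, show rating < 2800 from by omega, show rating < 10000 from by omega]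
  ·
    by_cases h1 : rating < 800
    ·
      simp [grcScan, grcBisectRight, grcThresholds, grcColors, show ¬ rating < 400 from by omega, show rating < 800 from by omega, show rating < 1200 from by omega, show rating < 1600 from by omega, show rating < 2000 from by omega, show rating < 2400 from by omega, show rating < 2800 from by omega, show rating < 10000 from by omega]
    ·
      by_cases h2 : rating < 1200
      ·
        simp [grcScan, grcBisectRight, grcThresholds, grcColors, show ¬ rating < 400 from by omega, show ¬ rating < 800 from by omega, show rating < 1200 from by omega, show rating < 1600 from by omega, show rating < 2000 from by omega, show rating < 2400 from by omega, show rating < 2800 from by omega, show rating < 10000 from by omega]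
      ·
        by_cases h3 : rating < 1600
        ·
          simp [grcScan, grcBisectRight, grcThresholds, grcColors, show ¬ rating < 400 from by omega, show ¬ rating < 800 from by omega, show ¬ rating < 1200 from by omega, show rating < 1600 from by omega, show rating < 2000 from by omega, show rating < 2400 from by omega, show rating < 2800 from by omega, show rating < 10000 from by omega]
        ·
          by_cases h4 : rating < 2000
          ·
            simp [grcScan, grcBisectRight, grcThresholds, grcColors, show ¬ rating < 400 from by omega, show ¬ rating < 800 from by omega, show ¬ rating < 1200 from by omega, show ¬ rating < 1600 from by omega, show rating < 2000 from by omega, show rating < 2400 from by omega, show rating < 2800 from by omega, show rating < 10000 from by omega]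
          ·
            by_cases h5 : rating < 2400
            ·
              simp [grcScan, grcBisectRight, grcThresholds, grcColors, show ¬ rating < 400 from by omega, show ¬ rating < 800 from by omega, show ¬ rating < 1200 from by omega, show ¬ rating < 1600 from by omega, show ¬ rating < 2000 from by omega, show rating < 2400 from by omega, show rating < 2800 from by omega, show rating < 10000 from by omega]
            ·
              by_cases h6 : rating < 2800
              ·
                simp [grcScan, grcBisectRight, grcThresholds, grcColors, show ¬ rating < 400 from by omega, show ¬ rating < 800 from by omega, show ¬ rating < 1200 from by omega, show ¬ rating < 1600 from by omega, show ¬ rating < 2000 from by omega, show ¬ rating < 2400 from by omega, show rating < 2800 from by omega, show rating < 10000 from by omega]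
              ·
                by_cases h7 : rating < 10000
                ·
                  simp [grcScan, grcBisectRight, grcThresholds, grcColors, show ¬ rating < 400 from by omega, show ¬ rating < 800 from by omega, show ¬ rating < 1200 from by omega, show ¬ rating < 1600 from by omega, show ¬ rating < 2000 from by omega, show ¬ rating < 2400 from by omega, show ¬ rating < 2800 from by omega, show rating < 10000 from by omega]
                ·
                  simp [grcScan, grcBisectRight, grcThresholds, grcColors, show ¬ rating < 400 from by omega, show ¬ rating < 800 from by omega, show ¬ rating < 1200 from by omega, show ¬ rating < 1600 from by omega, show ¬ rating < 2000 from by omega, show ¬ rating < 2400 from by omega, show ¬ rating < 2800 from by omega, show ¬ rating < 10000 from by omega]
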